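-- pv_equiv track=rewrite | github.com/MicroSpaceGen/MicroSpaceGen1 | src/analysis/gene_analyzer.py | _analyze_mutation_types
-- ===== SOURCE A (Python) =====
-- from typing import List, Dict, Tuple
--
-- def _analyze_mutation_types(sequence: str) -> Dict[str, int]:
--     """Analyze potential mutation types in the sequence"""
--     mutation_types = {
--         "transitions": 0,
--         "transversions": 0,
--         "insertions": 0,
--         "deletions": 0
--     }
--
--     # Count potential mutation sites
--     for i in range(len(sequence) - 1):
--         current = sequence[i].upper()
--         next_nuc = sequence[i+1].upper()
--
--         # Transitions (purine to purine or pyrimidine to pyrimidine)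
--         if ((current in 'AG' and next_nuc in 'AG') or
--             (current in 'CT' and next_nuc in 'CT')):
--             mutation_types["transitions"] += 1
--
--         # Transversions (purine to pyrimidine or vice versa)
--         elif ((current in 'AG' and next_nuc in 'CT') or
--               (current in 'CT' and next_nuc in 'AG')):
--             mutation_types["transversions"] += 1
--
--     return mutation_types
-- ===== SOURCE B (Python) =====
-- def _analyze_mutation_types(sequence: str):
--     """Count adjacent transition/transversion pairs via a bigram-count dictionary."""
--     s = sequence.upper()
--     bigrams = {}
--     for pair in zip(s, s[1:]):
--         bigrams[pair] = bigrams.get(pair, 0) + 1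
--     transitions = 0
--     transversions = 0
--     for (a, b), n in bigrams.items():
--         ca = 'R' if a in 'AG' else 'Y' if a in 'CT' else None
--         cb = 'R' if b in 'AG' else 'Y' if b in 'CT' else None
--         if ca is not None and cb is not None:
--             if ca == cb:
--                 transitions += n
--             else:
--                 transversions += n
--     return {"transitions": transitions, "transversions": transversions,
--             "insertions": 0, "deletions": 0}
-- ===== Notes on version B (the rewrite author's own statement) =====
-- stated objective: alternative
-- what changed: Replaces A's positional index loop that increments dict entries pair-by-pair with building a bigram-count dictionary over the upper-cased sequence once and then classifying each distinct adjacent pair (purine/pyrimidine) a single time, adding its whole count to transitions or transversions.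
import Mathlib
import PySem

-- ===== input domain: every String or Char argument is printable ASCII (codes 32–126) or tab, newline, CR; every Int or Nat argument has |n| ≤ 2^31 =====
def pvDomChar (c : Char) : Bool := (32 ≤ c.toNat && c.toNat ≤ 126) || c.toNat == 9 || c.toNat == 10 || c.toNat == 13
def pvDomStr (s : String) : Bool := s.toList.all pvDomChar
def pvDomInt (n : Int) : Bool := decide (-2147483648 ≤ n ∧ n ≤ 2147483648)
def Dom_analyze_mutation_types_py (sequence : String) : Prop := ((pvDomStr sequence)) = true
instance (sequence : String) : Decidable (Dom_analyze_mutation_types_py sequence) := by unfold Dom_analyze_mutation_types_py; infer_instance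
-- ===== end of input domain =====

-- B replaces A's positional scan by a bigram-count dictionary over the upper-cased sequence,
-- classifying each distinct adjacent pair once (objective: alternative decomposition, same cost).

-- ===== PORT A =====
def analyze_mutation_types_py (sequence : String) : List (String × Int) :=
  let cs := sequence.toList
  let mutation_types : PySem.Dict String Int :=
    PySem.Dict.ofList [("transitions", 0), ("transversions", 0), ("insertions", 0), ("deletions", 0)]
  -- for i in range(len(sequence) - 1): …  (sequence[i] is in range here, so the total pyGetD is exact;
  -- `current in 'AG'` on a 1-char string is exactly char membership)
  let final := (PySem.List.pyRange 0 ((cs.length : Int) - 1) 1).foldl (fun d i =>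
      let current := PySem.Chars.upperChar (PySem.List.pyGetD cs i ' ')
      let next_nuc := PySem.Chars.upperChar (PySem.List.pyGetD cs (i+1) ' ')
      if ((['A','G'] : List Char).contains current && (['A','G'] : List Char).contains next_nuc) ||
         ((['C','T'] : List Char).contains current && (['C','T'] : List Char).contains next_nuc) then
        d.modify "transitions" 0 (· + 1)
      else if ((['A','G'] : List Char).contains current && (['C','T'] : List Char).contains next_nuc) ||
              ((['C','T'] : List Char).contains current && (['A','G'] : List Char).contains next_nuc) then
        d.modify "transversions" 0 (· + 1)
      else d) mutation_types
  final.items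

-- ===== PORT B =====
-- 'R' if a in 'AG' else 'Y' if a in 'CT' else None   (char membership is exact for 1-char strings)
def pvClassify (c : Char) : Option Char :=
  if (['A','G'] : List Char).contains c then some 'R'
  else if (['C','T'] : List Char).contains c then some 'Y'
  else none

def analyze_mutation_types_py_alt (sequence : String) : List (String × Int) :=
  let s := PySem.Chars.upper sequence.toList
  -- bigrams[pair] = bigrams.get(pair, 0) + 1  over zip(s, s[1:])
  let bigrams := (s.zip (PySem.List.slice s (some 1) none)).foldl
      (fun d p => d.insert p (d.getD p 0 + 1)) (PySem.Dict.empty : PySem.Dict (Char × Char) Int)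
  let counts := bigrams.items.foldl
      (fun (acc : Int × Int) kn =>
        match pvClassify kn.1.1, pvClassify kn.1.2 with
        | some ca, some cb => if ca = cb then (acc.1 + kn.2, acc.2) else (acc.1, acc.2 + kn.2)
        | _, _ => acc) ((0 : Int), (0 : Int))
  [("transitions", counts.1), ("transversions", counts.2), ("insertions", 0), ("deletions", 0)]

-- ===== PRECONDITION & SPEC =====
def Spec_analyze_mutation_types_py (sequence : String) (out : List (String × Int)) : Prop := out = analyze_mutation_types_py_alt sequence
instance (sequence : String) (out : List (String × Int)) : Decidable (Spec_analyze_mutation_types_py sequence out) := by unfold Spec_analyze_mutation_types_py; infer_instance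

-- ===== CLAIM (what is proved, stated in full; the proofs are below) =====
def Claim_equal_analyze_mutation_types_py : Prop := ∀ (sequence : String), Dom_analyze_mutation_types_py sequence → Spec_analyze_mutation_types_py sequence (analyze_mutation_types_py sequence)

-- ===== LEMMAS AND PROOFS =====

def pvIsTr (p : Char × Char) : Bool :=
  ((['A','G'] : List Char).contains p.1 && (['A','G'] : List Char).contains p.2) ||
  ((['C','T'] : List Char).contains p.1 && (['C','T'] : List Char).contains p.2)

def pvIsTv (p : Char × Char) : Bool :=
  ((['A','G'] : List Char).contains p.1 && (['C','T'] : List Char).contains p.2) ||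
  ((['C','T'] : List Char).contains p.1 && (['A','G'] : List Char).contains p.2)

def pvD (a b : Int) : PySem.Dict String Int :=
  PySem.Dict.ofList [("transitions", a), ("transversions", b), ("insertions", 0), ("deletions", 0)]

def pvStep (d : PySem.Dict String Int) (p : Char × Char) : PySem.Dict String Int :=
  if pvIsTr p then d.modify "transitions" 0 (· + 1)
  else if pvIsTv p then d.modify "transversions" 0 (· + 1)
  else d

theorem pvNotBoth (c : Char) (h1 : (['A','G'] : List Char).contains c = true)
    (h2 : (['C','T'] : List Char).contains c = true) : False := by
  simp [List.contains_eq_mem] at h1 h2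
  rcases h1 with h1 | h1 <;> rcases h2 with h2 | h2 <;> subst h1 <;> simp_all

theorem pvExcl (p : Char × Char) (h : pvIsTr p = true) : pvIsTv p = false := by
  obtain ⟨x, y⟩ := p
  simp only [pvIsTr, Bool.or_eq_true, Bool.and_eq_true] at h
  by_contra hc
  rw [Bool.not_eq_false] at hc
  simp only [pvIsTv, Bool.or_eq_true, Bool.and_eq_true] at hc
  rcases h with ⟨hx, hy⟩ | ⟨hx, hy⟩ <;> rcases hc with ⟨hx', hy'⟩ | ⟨hx', hy'⟩
  · exact pvNotBoth y hy hy'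
  · exact pvNotBoth x hx hx'
  · exact pvNotBoth x hx' hx
  · exact pvNotBoth y hy' hy

theorem pvD_modT (a b : Int) : (pvD a b).modify "transitions" 0 (· + 1) = pvD (a + 1) b := rfl
theorem pvD_modV (a b : Int) : (pvD a b).modify "transversions" 0 (· + 1) = pvD a (b + 1) := rfl

theorem pvAL (l : List (Char × Char)) (a b : Int) :
    l.foldl pvStep (pvD a b) = pvD (a + l.countP pvIsTr) (b + l.countP pvIsTv) := by
  induction l generalizing a b with
  | nil => simp
  | cons x t ih =>
    simp only [List.foldl_cons, List.countP_cons]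
    by_cases h1 : pvIsTr x
    · have h2 := pvExcl x h1
      rw [show pvStep (pvD a b) x = pvD (a + 1) b by simp [pvStep, h1, pvD_modT], ih]
      simp only [h1, h2, if_true, if_false, Bool.false_eq_true]
      congr 1
      push_cast; ring
    · by_cases h2 : pvIsTv x
      · rw [show pvStep (pvD a b) x = pvD a (b + 1) by simp [pvStep, h1, h2, pvD_modV], ih]
        simp only [h1, h2, if_true, if_false, Bool.false_eq_true]
        congr 1
        push_cast; ring
      · rw [show pvStep (pvD a b) x = pvD a b by simp [pvStep, h1, h2], ih]
        simp [h1, h2]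

theorem pvML (cs : List Char) :
    (PySem.List.pyRange 0 ((cs.length : Int) - 1) 1).map
      (fun i => (PySem.Chars.upperChar (PySem.List.pyGetD cs i ' '),
                 PySem.Chars.upperChar (PySem.List.pyGetD cs (i + 1) ' ')))
    = (PySem.Chars.upper cs).zip ((PySem.Chars.upper cs).drop 1) := by
  cases cs with
  | nil => rfl
  | cons c t =>
    have hlen : ((c :: t).length : Int) - 1 = ((t.length : Nat) : Int) := by
      simp [List.length_cons]
    rw [hlen, PySem.List.pyRange_zero_natCast, List.map_map]
    apply List.ext_getElem
    · simp [PySem.Chars.upper]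
    · intro i hi hi'
      simp only [List.length_map, List.length_range] at hi
      have h1 : PySem.List.pyGetD (c :: t) ((i : Int)) ' ' = (c :: t)[i] := by
        rw [PySem.List.pyGetD_natCast]
        exact List.getD_eq_getElem _ _ (by simp only [List.length_cons]; omega)
      have h2 : PySem.List.pyGetD (c :: t) ((i : Int) + 1) ' ' = (c :: t)[i + 1] := by
        rw [show ((i : Int) + 1) = ((i + 1 : Nat) : Int) by push_cast; ring,
            PySem.List.pyGetD_natCast]
        exact List.getD_eq_getElem _ _ (by simp only [List.length_cons]; omega)
      have h3 : (1 : Nat) + i = i + 1 := Nat.add_comm 1 i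
      simp only [Function.comp_apply, List.getElem_map, List.getElem_range,
        List.getElem_zip, PySem.Chars.upper, List.getElem_drop, h1, h2, h3]

theorem pvInd0 {f : Char × Char → Bool} {x : Char × Char} (ks : List (Char × Char))
    (hx : x ∉ ks) :
    (ks.map (fun k => if f k ∧ k = x then (1 : Int) else 0)).sum = 0 := by
  induction ks with
  | nil => rfl
  | cons k t ih =>
    simp only [List.mem_cons, not_or] at hx
    have hk : ¬ (k = x) := fun h => hx.1 h.symm
    simp [List.map_cons, List.sum_cons, hk, ih hx.2]

theorem pvInd {f : Char × Char → Bool} {x : Char × Char} (ks : List (Char × Char))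
    (hnd : ks.Nodup) (hx : x ∈ ks) :
    (ks.map (fun k => if f k ∧ k = x then (1 : Int) else 0)).sum
      = if f x then 1 else 0 := by
  induction ks with
  | nil => cases hx
  | cons k t ih =>
    rcases List.mem_cons.mp hx with h | h
    · subst h
      simp [pvInd0 t (List.nodup_cons.mp hnd).1]
    · have hne : ¬ (k = x) := by
        have := (List.nodup_cons.mp hnd).1
        rintro rfl; exact this h
      simp [hne, ih (List.nodup_cons.mp hnd).2 h]

theorem pvSL (f : Char × Char → Bool) (l ks : List (Char × Char)) (hnd : ks.Nodup)
    (hsub : ∀ x ∈ l, x ∈ ks) :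
    (ks.map (fun k => if f k then (l.count k : Int) else 0)).sum = (l.countP f : Int) := by
  induction l with
  | nil => simp
  | cons x t ih =>
    have hsplit : ∀ k : Char × Char,
        (if f k then ((x :: t).count k : Int) else 0)
          = (if f k then (t.count k : Int) else 0)
            + (if f k ∧ k = x then (1 : Int) else 0) := by
      intro k
      by_cases hf : f k
      · by_cases hk : k = x
        · subst hk; simp [hf]
        · simp [hf, hk, show ¬ x = k from fun h => hk h.symm]
      · simp [hf]
    calc (ks.map (fun k => if f k then ((x :: t).count k : Int) else 0)).sum
        = (ks.map (fun k => (if f k then (t.count k : Int) else 0)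
            + (if f k ∧ k = x then (1 : Int) else 0))).sum := by
          congr 1; exact List.map_congr_left (fun k _ => hsplit k)
      _ = (ks.map (fun k => if f k then (t.count k : Int) else 0)).sum
            + (ks.map (fun k => if f k ∧ k = x then (1 : Int) else 0)).sum :=
          PySem.List.sum_map_add_int ks _ _
      _ = (t.countP f : Int) + (if f x then 1 else 0) := by
          rw [ih (fun y hy => hsub y (List.mem_cons_of_mem x hy)),
              pvInd ks hnd (hsub x (List.mem_cons_self))]
      _ = ((x :: t).countP f : Int) := by
          by_cases hf : f x <;> simp [hf]

theorem pvAGnotCT (c : Char) (h : c = 'A' ∨ c = 'G') : ¬ (c = 'C' ∨ c = 'T') := by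
  rcases h with rfl | rfl <;> simp

theorem pvBody (a b n : Int) (k : Char × Char) :
    (match pvClassify k.1, pvClassify k.2 with
      | some ca, some cb => if ca = cb then (a + n, b) else (a, b + n)
      | _, _ => ((a : Int), (b : Int)))
    = if pvIsTr k then (a + n, b)
      else if pvIsTv k then (a, b + n) else (a, b) := by
  obtain ⟨x, y⟩ := k
  by_cases hx1 : x = 'A' ∨ x = 'G'
  · by_cases hy1 : y = 'A' ∨ y = 'G'
    · simp [pvClassify, pvIsTr, hx1, hy1]
    · by_cases hy2 : y = 'C' ∨ y = 'T'
      · simp [pvClassify, pvIsTr, pvIsTv, hx1, hy1, hy2, pvAGnotCT x hx1]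
      · simp [pvClassify, pvIsTr, pvIsTv, hx1, hy1, hy2]
  · by_cases hx2 : x = 'C' ∨ x = 'T'
    · by_cases hy1 : y = 'A' ∨ y = 'G'
      · simp [pvClassify, pvIsTr, pvIsTv, hx1, hx2, hy1, pvAGnotCT y hy1]
      · by_cases hy2 : y = 'C' ∨ y = 'T'
        · simp [pvClassify, pvIsTr, hx1, hx2, hy1, hy2]
        · simp [pvClassify, pvIsTr, pvIsTv, hx1, hx2, hy1, hy2]
    · simp [pvClassify, pvIsTr, pvIsTv, hx1, hx2]

theorem pvBL (l ks : List (Char × Char)) (t v : Int) :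
    ((ks.map (fun k => (k, (l.count k : Int)))).foldl
      (fun (acc : Int × Int) kn =>
        match pvClassify kn.1.1, pvClassify kn.1.2 with
        | some ca, some cb => if ca = cb then (acc.1 + kn.2, acc.2) else (acc.1, acc.2 + kn.2)
        | _, _ => acc) (t, v))
    = (t + (ks.map (fun k => if pvIsTr k then (l.count k : Int) else 0)).sum,
       v + (ks.map (fun k => if pvIsTv k then (l.count k : Int) else 0)).sum) := by
  induction ks generalizing t v with
  | nil => simp
  | cons k tl ih =>
    simp only [List.map_cons, List.foldl_cons, List.sum_cons]
    rw [pvBody t v (l.count k : Int) k]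
    by_cases h1 : pvIsTr k
    · rw [if_pos h1, ih]; simp [h1, pvExcl k h1, add_assoc]
    · by_cases h2 : pvIsTv k
      · rw [if_neg h1, if_pos h2, ih]; simp [h1, h2, add_assoc]
      · rw [if_neg h1, if_neg h2, ih]; simp [h1, h2]

theorem pvA_fold (cs : List Char) (d : PySem.Dict String Int) :
    (PySem.List.pyRange 0 ((cs.length : Int) - 1) 1).foldl
      (fun d i =>
        if (['A','G'].contains (PySem.Chars.upperChar (PySem.List.pyGetD cs i ' ')) &&
              ['A','G'].contains (PySem.Chars.upperChar (PySem.List.pyGetD cs (i + 1) ' ')) ||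
            ['C','T'].contains (PySem.Chars.upperChar (PySem.List.pyGetD cs i ' ')) &&
              ['C','T'].contains (PySem.Chars.upperChar (PySem.List.pyGetD cs (i + 1) ' '))) = true then
          d.modify "transitions" 0 (· + 1)
        else
          if (['A','G'].contains (PySem.Chars.upperChar (PySem.List.pyGetD cs i ' ')) &&
                ['C','T'].contains (PySem.Chars.upperChar (PySem.List.pyGetD cs (i + 1) ' ')) ||
              ['C','T'].contains (PySem.Chars.upperChar (PySem.List.pyGetD cs i ' ')) &&
                ['A','G'].contains (PySem.Chars.upperChar (PySem.List.pyGetD cs (i + 1) ' '))) = true then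
            d.modify "transversions" 0 (· + 1)
          else d) d
    = ((PySem.Chars.upper cs).zip ((PySem.Chars.upper cs).drop 1)).foldl pvStep d := by
  rw [← pvML cs, List.foldl_map]
  rfl

-- ===== VERDICT (by name: the statement is the Claim_ definition above) =====
theorem analyze_mutation_types_py_spec : Claim_equal_analyze_mutation_types_py := by
  intro sequence _
  unfold Spec_analyze_mutation_types_py
  simp only [analyze_mutation_types_py, analyze_mutation_types_py_alt]
  rw [show PySem.List.slice (PySem.Chars.upper sequence.toList) (some 1) none
        = (PySem.Chars.upper sequence.toList).drop 1 by
      simpa using PySem.List.slice_from (xs := PySem.Chars.upper sequence.toList) (a := 1)]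
  rw [show (PySem.Dict.ofList [("transitions", (0:Int)), ("transversions", 0), ("insertions", 0), ("deletions", 0)]) = pvD 0 0 from rfl]
  rw [pvA_fold sequence.toList (pvD 0 0), pvAL]
  rw [PySem.Dict.foldl_insert_getD_add_one_eq_counter, PySem.Dict.items_counter, pvBL]
  rw [pvSL pvIsTr _ _ (PySem.Set.nodup_ofList _) (fun x hx => (PySem.Set.mem_ofList _ _).mpr hx),
      pvSL pvIsTv _ _ (PySem.Set.nodup_ofList _) (fun x hx => (PySem.Set.mem_ofList _ _).mpr hx)]
  simp [pvD]
  rfl
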